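-- pv_equiv track=rewrite | github.com/rtehok/perso-python | leetcode/2101_detonate_the_maximum_bombs.py | maximumDetonationDFS
-- ===== SOURCE A (Python) =====
-- import collections
-- from typing import List
--
-- def maximumDetonationDFS(bombs: List[List[int]]) -> int:
--     n = len(bombs)
--
--     graph = collections.defaultdict(list)
--     for i in range(n):
--         for j in range(n):
--             if i == j:
--                 continue
--             xi, yi, ri = bombs[i]
--             xj, yj, _ = bombs[j]
--
--             if ri ** 2 >= (xi - xj) ** 2 + (yi - yj) ** 2:
--                 graph[i].append(j)
--
--     def dfs(cur, visit):
--         visit.add(cur)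
--         for neighbor in graph[cur]:
--             if neighbor not in visit:
--                 dfs(neighbor, visit)
--         return len(visit)
--
--     ans = 0
--     for i in range(n):
--         ans = max(ans, dfs(i, set()))
--
--     return ans
-- ===== SOURCE B (Python) =====
-- from typing import List
--
-- def maximumDetonationDFS(bombs: List[List[int]]) -> int:
--     n = len(bombs)
--
--     adj = []
--     for i in range(n):
--         row = []
--         for j in range(n):
--             if i == j:
--                 continue
--             xi, yi, ri = bombs[i]
--             xj, yj, _ = bombs[j]
--             if ri ** 2 >= (xi - xj) ** 2 + (yi - yj) ** 2:
--                 row.append(j)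
--         adj.append(row)
--
--     ans = 0
--     for i in range(n):
--         reach = {i}
--         frontier = [i]
--         while frontier:
--             new = []
--             for u in frontier:
--                 for v in adj[u]:
--                     if v not in reach:
--                         reach.add(v)
--                         new.append(v)
--             frontier = new
--         ans = max(ans, len(reach))
--     return ans
-- ===== Notes on version B (the rewrite author's own statement) =====
-- stated objective: alternative
-- what changed: The recursive depth-first search with a shared visited set is replaced by an iterative breadth-first traversal that maintains an explicit frontier list of newly reached nodes and expands it level by level until no new node appears.
import Mathlib
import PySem

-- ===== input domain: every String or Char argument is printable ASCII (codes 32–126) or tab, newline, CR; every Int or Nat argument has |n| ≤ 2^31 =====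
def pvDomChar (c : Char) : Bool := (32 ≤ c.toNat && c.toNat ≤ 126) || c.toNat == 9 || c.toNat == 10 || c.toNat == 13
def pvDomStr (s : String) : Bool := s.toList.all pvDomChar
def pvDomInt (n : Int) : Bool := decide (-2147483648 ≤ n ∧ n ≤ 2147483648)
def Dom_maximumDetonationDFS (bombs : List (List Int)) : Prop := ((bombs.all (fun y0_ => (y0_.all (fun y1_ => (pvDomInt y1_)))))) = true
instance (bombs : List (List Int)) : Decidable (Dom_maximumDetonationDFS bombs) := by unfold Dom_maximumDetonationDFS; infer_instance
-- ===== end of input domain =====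

-- B replaces A's recursive depth-first search by an iterative level-by-level breadth-first
-- traversal with an explicit frontier list (objective: alternative, same asymptotic cost).

-- ===== PORT A =====
-- the detonation test 'ri ** 2 >= (xi - xj) ** 2 + (yi - yj) ** 2' with its unpacked row values
-- (bombs[i] / bombs[j] read through pyGetD: exact on Pre_, where every read row has length 3)
def pvHit (bombs : List (List Int)) (i j : Int) : Bool :=
  let xi := PySem.List.pyGetD (PySem.List.pyGetD bombs i []) 0 0
  let yi := PySem.List.pyGetD (PySem.List.pyGetD bombs i []) 1 0
  let ri := PySem.List.pyGetD (PySem.List.pyGetD bombs i []) 2 0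
  let xj := PySem.List.pyGetD (PySem.List.pyGetD bombs j []) 0 0
  let yj := PySem.List.pyGetD (PySem.List.pyGetD bombs j []) 1 0
  decide (ri ^ 2 ≥ (xi - xj) ^ 2 + (yi - yj) ^ 2)

-- A's recursive dfs; the fuel argument only bounds the recursion depth (the proofs show it is
-- never exhausted when called with fuel = len(bombs) from the main loop)
def pvDfsA (graph : PySem.Dict Int (List Int)) : Nat → Int → List Int → List Int
  | 0, cur, visit => PySem.Set.add visit cur
  | fuel+1, cur, visit =>
      (graph.getD cur []).foldl
        (fun v neighbor => if neighbor ∈ v then v else pvDfsA graph fuel neighbor v)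
        (PySem.Set.add visit cur)

def maximumDetonationDFS (bombs : List (List Int)) : Int :=
  let n := bombs.length
  let graph : PySem.Dict Int (List Int) :=
    (PySem.List.pyRange 0 (n : Int) 1).foldl (fun g i =>
      (PySem.List.pyRange 0 (n : Int) 1).foldl (fun g j =>
        if i == j then g
        else if pvHit bombs i j then g.modify i [] (fun l => l ++ [j])
        else g) g) PySem.Dict.empty
  (PySem.List.pyRange 0 (n : Int) 1).foldl
    (fun ans i => max ans ((pvDfsA graph n i PySem.Set.empty).length : Int)) 0

-- ===== PORT B =====
-- B's 'while frontier:' loop; each pass expands the whole frontier into the next one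
-- (fuel n+1 bounds the number of passes; the proofs show it is never exhausted)
def pvBfsB (adj : List (List Int)) : Nat → List Int → List Int → List Int
  | 0, reach, _ => reach
  | fuel+1, reach, frontier =>
      match frontier with
      | [] => reach
      | _ :: _ =>
        let rq := frontier.foldl (fun rq u =>
            (PySem.List.pyGetD adj u []).foldl
              (fun rq v => if v ∈ rq.1 then rq else (PySem.Set.add rq.1 v, rq.2 ++ [v])) rq)
          (reach, ([] : List Int))
        pvBfsB adj fuel rq.1 rq.2

def maximumDetonationDFS_alt (bombs : List (List Int)) : Int :=
  let n := bombs.length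
  let adj : List (List Int) :=
    (PySem.List.pyRange 0 (n : Int) 1).foldl (fun acc i =>
      acc ++ [(PySem.List.pyRange 0 (n : Int) 1).foldl (fun row j =>
        if i == j then row
        else if pvHit bombs i j then row ++ [j]
        else row) []]) []
  (PySem.List.pyRange 0 (n : Int) 1).foldl
    (fun ans i => max ans ((pvBfsB adj (n + 1) (PySem.Set.ofList [i]) [i]).length : Int)) 0

-- ===== PRECONDITION & SPEC =====
-- Pre_ excludes exactly the inputs where Python A raises ValueError: with at least two bombs,
-- every row is unpacked as 'x, y, r', so some row of length ≠ 3 makes A (and B) raise.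
def Pre_maximumDetonationDFS (bombs : List (List Int)) : Prop :=
  bombs.length ≤ 1 ∨ ∀ row ∈ bombs, row.length = 3
instance (bombs : List (List Int)) : Decidable (Pre_maximumDetonationDFS bombs) := by
  unfold Pre_maximumDetonationDFS; infer_instance

def pvWitness_maximumDetonationDFS : List (List Int) := [[0, 0, 1], [1, 0, 0]]

def Spec_maximumDetonationDFS (bombs : List (List Int)) (out : Int) : Prop := out = maximumDetonationDFS_alt bombs
instance (bombs : List (List Int)) (out : Int) : Decidable (Spec_maximumDetonationDFS bombs out) := by unfold Spec_maximumDetonationDFS; infer_instance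

-- ===== CLAIM (what is proved, stated in full; the proofs are below) =====
def Claim_equal_maximumDetonationDFS : Prop := ∀ (bombs : List (List Int)), Dom_maximumDetonationDFS bombs → Pre_maximumDetonationDFS bombs → Spec_maximumDetonationDFS bombs (maximumDetonationDFS bombs)

-- ===== LEMMAS AND PROOFS =====

-- the index range [0, n) and the neighbour list of node i, shared vocabulary of the proofs
def pvR (bombs : List (List Int)) : List Int := PySem.List.pyRange 0 (bombs.length : Int) 1

def pvN (bombs : List (List Int)) (i : Int) : List Int :=
  (pvR bombs).filter (fun j => !(i == j) && pvHit bombs i j)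

-- a node set is closed when it contains all neighbours of its members
def pvClosed (bombs : List (List Int)) (S : List Int) : Prop :=
  ∀ u ∈ S, ∀ v ∈ pvN bombs u, v ∈ S

theorem pvNodup_length_le {l₁ l₂ : List Int} (h : l₁.Nodup) (hs : l₁ ⊆ l₂) :
    l₁.length ≤ l₂.length := by
  have h1 : l₁.toFinset.card = l₁.length := List.toFinset_card_of_nodup h
  have h2 : l₁.toFinset ⊆ l₂.toFinset := by
    intro x hx; simp only [List.mem_toFinset] at *; exact hs hx
  calc l₁.length = l₁.toFinset.card := h1.symm
    _ ≤ l₂.toFinset.card := Finset.card_le_card h2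
    _ ≤ l₂.length := List.toFinset_card_le l₂

theorem pvR_eq (bombs : List (List Int)) :
    pvR bombs = List.map (fun k : Nat => (k : Int)) (List.range bombs.length) :=
  PySem.List.pyRange_zero_natCast bombs.length

theorem pvR_length (bombs : List (List Int)) : (pvR bombs).length = bombs.length := by
  rw [pvR_eq, List.length_map, List.length_range]

theorem pvR_nodup (bombs : List (List Int)) : (pvR bombs).Nodup := by
  rw [pvR_eq]
  exact List.Nodup.map (fun a b hab => by exact_mod_cast hab) List.nodup_range

theorem pvN_subset {bombs : List (List Int)} {i v : Int} (h : v ∈ pvN bombs i) :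
    v ∈ pvR bombs := (List.mem_filter.mp h).1

-- A's adjacency dictionary and B's adjacency list, as built by the ports
def pvGraphA (bombs : List (List Int)) : PySem.Dict Int (List Int) :=
  (pvR bombs).foldl (fun g i =>
    (pvR bombs).foldl (fun g j =>
      if i == j then g
      else if pvHit bombs i j then g.modify i [] (fun l => l ++ [j])
      else g) g) PySem.Dict.empty

def pvAdjB (bombs : List (List Int)) : List (List Int) :=
  (pvR bombs).foldl (fun acc i =>
    acc ++ [(pvR bombs).foldl (fun row j =>
      if i == j then row
      else if pvHit bombs i j then row ++ [j]
      else row) []]) []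

theorem pvA_unfold (bombs : List (List Int)) :
    maximumDetonationDFS bombs = (pvR bombs).foldl
      (fun ans i => max ans ((pvDfsA (pvGraphA bombs) bombs.length i PySem.Set.empty).length : Int)) 0 := rfl

theorem pvB_unfold (bombs : List (List Int)) :
    maximumDetonationDFS_alt bombs = (pvR bombs).foldl
      (fun ans i => max ans ((pvBfsB (pvAdjB bombs) (bombs.length + 1) (PySem.Set.ofList [i]) [i]).length : Int)) 0 := rfl

theorem pvInnerA_getD_self (bombs : List (List Int)) (i : Int) :
    ∀ (js : List Int) (g : PySem.Dict Int (List Int)),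
      ((js.foldl (fun g j => if i == j then g
          else if pvHit bombs i j then g.modify i [] (fun l => l ++ [j]) else g) g).getD i [])
        = g.getD i [] ++ js.filter (fun j => !(i == j) && pvHit bombs i j) := by
  intro js
  induction js with
  | nil => intro g; simp
  | cons j js ih =>
    intro g
    simp only [List.foldl_cons, List.filter_cons]
    by_cases hij : i = j
    · rw [if_pos (show (i == j) = true by simp [hij]), ih]
      simp [hij]
    · by_cases hh : pvHit bombs i j = true
      · rw [if_neg (show ¬ (i == j) = true by simp [hij]), if_pos hh, ih,
          PySem.Dict.getD_modify_self]
        simp [hij, hh]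
      · rw [if_neg (show ¬ (i == j) = true by simp [hij]), if_neg hh, ih]
        simp [hh]

theorem pvInnerA_getD_ne (bombs : List (List Int)) (i k : Int) (hk : k ≠ i) :
    ∀ (js : List Int) (g : PySem.Dict Int (List Int)),
      ((js.foldl (fun g j => if i == j then g
          else if pvHit bombs i j then g.modify i [] (fun l => l ++ [j]) else g) g).getD k [])
        = g.getD k [] := by
  intro js
  induction js with
  | nil => intro g; simp
  | cons j js ih =>
    intro g
    simp only [List.foldl_cons]
    by_cases hij : i = j
    · rw [if_pos (show (i == j) = true by simp [hij]), ih]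
    · by_cases hh : pvHit bombs i j = true
      · rw [if_neg (show ¬ (i == j) = true by simp [hij]), if_pos hh, ih,
          PySem.Dict.getD_modify_of_ne _ _ _ hk]
      · rw [if_neg (show ¬ (i == j) = true by simp [hij]), if_neg hh, ih]

theorem pvOuterA_untouched (bombs : List (List Int)) (u : Int) :
    ∀ (is : List Int) (g : PySem.Dict Int (List Int)), u ∉ is →
      ((is.foldl (fun g i => (pvR bombs).foldl (fun g j => if i == j then g
          else if pvHit bombs i j then g.modify i [] (fun l => l ++ [j]) else g) g) g).getD u [])
        = g.getD u [] := by
  intro is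
  induction is with
  | nil => intro g _; rfl
  | cons i is ih =>
    intro g hu
    have hui : u ≠ i := fun h => hu (h ▸ List.mem_cons_self ..)
    have hus : u ∉ is := fun h => hu (List.mem_cons_of_mem _ h)
    simp only [List.foldl_cons]
    rw [ih _ hus, pvInnerA_getD_ne bombs i u hui]

theorem pvOuterA_getD (bombs : List (List Int)) (u : Int) :
    ∀ (is : List Int) (g : PySem.Dict Int (List Int)), u ∈ is → is.Nodup →
      ((is.foldl (fun g i => (pvR bombs).foldl (fun g j => if i == j then g
          else if pvHit bombs i j then g.modify i [] (fun l => l ++ [j]) else g) g) g).getD u [])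
        = g.getD u [] ++ pvN bombs u := by
  intro is
  induction is with
  | nil => intro g h; exact absurd h List.not_mem_nil
  | cons i is ih =>
    intro g hu hnd
    rcases List.mem_cons.mp hu with h | h
    · subst h
      simp only [List.foldl_cons]
      rw [pvOuterA_untouched bombs u is _ (List.nodup_cons.mp hnd).1,
        pvInnerA_getD_self bombs u (pvR bombs) g]
      rfl
    · simp only [List.foldl_cons]
      rw [ih _ h (List.nodup_cons.mp hnd).2]
      have hui : u ≠ i := fun he => (List.nodup_cons.mp hnd).1 (he ▸ h)
      rw [pvInnerA_getD_ne bombs i u hui (pvR bombs) g]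

theorem pvGraphA_getD (bombs : List (List Int)) (u : Int) (hu : u ∈ pvR bombs) :
    (pvGraphA bombs).getD u [] = pvN bombs u := by
  unfold pvGraphA
  rw [pvOuterA_getD bombs u (pvR bombs) PySem.Dict.empty hu (pvR_nodup bombs)]
  simp

theorem pvRowB (bombs : List (List Int)) (i : Int) :
    ∀ (js : List Int) (acc : List Int),
      js.foldl (fun row j => if i == j then row
          else if pvHit bombs i j then row ++ [j] else row) acc
        = acc ++ js.filter (fun j => !(i == j) && pvHit bombs i j) := by
  intro js
  induction js with
  | nil => intro acc; simp
  | cons j js ih =>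
    intro acc
    simp only [List.foldl_cons, List.filter_cons]
    by_cases hij : i = j
    · rw [if_pos (show (i == j) = true by simp [hij]), ih]
      simp [hij]
    · by_cases hh : pvHit bombs i j = true
      · rw [if_neg (show ¬ (i == j) = true by simp [hij]), if_pos hh, ih]
        simp [hij, hh]
      · rw [if_neg (show ¬ (i == j) = true by simp [hij]), if_neg hh, ih]
        simp [hh]

theorem pvAdjB_eq (bombs : List (List Int)) : pvAdjB bombs = (pvR bombs).map (pvN bombs) := by
  unfold pvAdjB
  rw [PySem.List.foldl_append_singleton_eq_map
    (f := fun i => (pvR bombs).foldl (fun row j => if i == j then row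
      else if pvHit bombs i j then row ++ [j] else row) []), List.nil_append]
  apply List.map_congr_left
  intro i _
  rw [pvRowB bombs i (pvR bombs) [], List.nil_append]
  rfl

theorem pvAdjB_getD (bombs : List (List Int)) (u : Int) (hu : u ∈ pvR bombs) :
    PySem.List.pyGetD (pvAdjB bombs) u [] = pvN bombs u := by
  obtain ⟨h0, hlt⟩ := PySem.List.mem_pyRange_one.mp hu
  have hk : u = ((u.toNat : Nat) : Int) := (Int.toNat_of_nonneg h0).symm
  rw [pvAdjB_eq, hk, PySem.List.pyGetD_natCast, pvR_eq, List.map_map,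
    PySem.List.getD_map_range _ _ _ _ (show u.toNat < bombs.length by omega)]
  rfl

-- monotonicity of A's dfs: the visited set only grows
theorem pvDfsA_mono (g : PySem.Dict Int (List Int)) :
    ∀ (fuel : Nat) (cur : Int) (visit : List Int),
      PySem.Set.add visit cur ⊆ pvDfsA g fuel cur visit := by
  intro fuel
  induction fuel with
  | zero => intro cur visit; exact fun x h => h
  | succ fuel ih =>
    intro cur visit
    have hf : ∀ (ns : List Int) (v : List Int),
        v ⊆ ns.foldl (fun v nb => if nb ∈ v then v else pvDfsA g fuel nb v) v := by
      intro ns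
      induction ns with
      | nil => intro v; exact fun x h => h
      | cons a ns ihn =>
        intro v
        simp only [List.foldl_cons]
        by_cases ha : a ∈ v
        · rw [if_pos ha]; exact ihn v
        · rw [if_neg ha]
          intro x hx
          exact ihn _ (ih a v ((PySem.Set.mem_add v a x).mpr (Or.inl hx)))
    exact hf (g.getD cur []) (PySem.Set.add visit cur)

theorem pvDfsA_subset (g : PySem.Dict Int (List Int)) (fuel : Nat) (cur : Int)
    (visit : List Int) : visit ⊆ pvDfsA g fuel cur visit :=
  fun _ hx => pvDfsA_mono g fuel cur visit ((PySem.Set.mem_add visit cur _).mpr (Or.inl hx))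

theorem pvDfsA_mem (g : PySem.Dict Int (List Int)) (fuel : Nat) (cur : Int)
    (visit : List Int) : cur ∈ pvDfsA g fuel cur visit :=
  pvDfsA_mono g fuel cur visit ((PySem.Set.mem_add visit cur cur).mpr (Or.inr rfl))

theorem pvDfsFold_mono (g : PySem.Dict Int (List Int)) (fuel : Nat) :
    ∀ (ns : List Int) (v : List Int),
      v ⊆ ns.foldl (fun v nb => if nb ∈ v then v else pvDfsA g fuel nb v) v := by
  intro ns
  induction ns with
  | nil => intro v; exact fun x h => h
  | cons a ns ihn =>
    intro v
    simp only [List.foldl_cons]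
    by_cases ha : a ∈ v
    · rw [if_pos ha]; exact ihn v
    · rw [if_neg ha]
      intro x hx
      exact ihn _ (pvDfsA_mono g fuel a v ((PySem.Set.mem_add v a x).mpr (Or.inl hx)))

-- invariant carried through the neighbour loop of dfs
def pvDfsInv (bombs : List (List Int)) (visit : List Int) (cur : Int) (v : List Int) : Prop :=
  v.Nodup ∧ v ⊆ pvR bombs ∧ visit.length < v.length ∧ cur ∈ v ∧
  (∀ x ∈ v, x ∉ visit → x ≠ cur → ∀ y ∈ pvN bombs x, y ∈ v)

-- what dfs guarantees at a given fuel: its result is a nodup subset of the node range,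
-- closed at every newly visited node, and minimal among closed supersets
def pvDfsGood (bombs : List (List Int)) (g : PySem.Dict Int (List Int)) (fuel : Nat) : Prop :=
  ∀ (cur : Int) (visit : List Int), cur ∈ pvR bombs → cur ∉ visit → visit.Nodup →
    visit ⊆ pvR bombs → bombs.length ≤ fuel + visit.length →
    (pvDfsA g fuel cur visit).Nodup ∧ (pvDfsA g fuel cur visit) ⊆ pvR bombs ∧
    (∀ x ∈ pvDfsA g fuel cur visit, x ∉ visit → ∀ y ∈ pvN bombs x, y ∈ pvDfsA g fuel cur visit) ∧
    (∀ T, pvClosed bombs T → cur ∈ T → visit ⊆ T → pvDfsA g fuel cur visit ⊆ T)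

theorem pvDfsA_fold (bombs : List (List Int)) (g : PySem.Dict Int (List Int)) (fuel : Nat)
    (ihmain : pvDfsGood bombs g fuel) (cur : Int) (visit : List Int)
    (hbudget : bombs.length ≤ fuel + visit.length + 1) :
    ∀ (ms : List Int) (v : List Int), (∀ a ∈ ms, a ∈ pvN bombs cur) →
      pvDfsInv bombs visit cur v →
      pvDfsInv bombs visit cur
        (ms.foldl (fun v nb => if nb ∈ v then v else pvDfsA g fuel nb v) v) ∧
      (∀ a ∈ ms, a ∈ ms.foldl (fun v nb => if nb ∈ v then v else pvDfsA g fuel nb v) v) ∧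
      (∀ T, pvClosed bombs T → cur ∈ T → v ⊆ T →
        ms.foldl (fun v nb => if nb ∈ v then v else pvDfsA g fuel nb v) v ⊆ T) := by
  intro ms
  induction ms with
  | nil =>
    intro v _ hinv
    exact ⟨hinv, fun a ha => absurd ha List.not_mem_nil, fun T _ _ hvT => hvT⟩
  | cons a ms ihm =>
    intro v hms hinv
    obtain ⟨hnd, hsub, hlen, hcurv, hclosed⟩ := hinv
    simp only [List.foldl_cons]
    by_cases ha : a ∈ v
    · rw [if_pos ha]
      obtain ⟨hinv', hmem', hmin'⟩ :=
        ihm v (fun b hb => hms b (List.mem_cons_of_mem _ hb)) ⟨hnd, hsub, hlen, hcurv, hclosed⟩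
      refine ⟨hinv', ?_, hmin'⟩
      intro b hb
      rcases List.mem_cons.mp hb with rfl | hb
      · exact pvDfsFold_mono g fuel ms v ha
      · exact hmem' b hb
    · rw [if_neg ha]
      have haN : a ∈ pvN bombs cur := hms a (List.mem_cons_self ..)
      have haR : a ∈ pvR bombs := pvN_subset haN
      obtain ⟨hDnd, hDsub, hDclosed, hDmin⟩ := ihmain a v haR ha hnd hsub (by omega)
      have hvD : v ⊆ pvDfsA g fuel a v := pvDfsA_subset g fuel a v
      have hinvD : pvDfsInv bombs visit cur (pvDfsA g fuel a v) := by
        refine ⟨hDnd, hDsub, lt_of_lt_of_le hlen (pvNodup_length_le hnd hvD), hvD hcurv, ?_⟩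
        intro x hx hxvis hxcur y hy
        by_cases hxv : x ∈ v
        · exact hvD (hclosed x hxv hxvis hxcur y hy)
        · exact hDclosed x hx hxv y hy
      obtain ⟨hinv', hmem', hmin'⟩ :=
        ihm (pvDfsA g fuel a v) (fun b hb => hms b (List.mem_cons_of_mem _ hb)) hinvD
      refine ⟨hinv', ?_, ?_⟩
      · intro b hb
        rcases List.mem_cons.mp hb with rfl | hb
        · exact pvDfsFold_mono g fuel ms (pvDfsA g fuel b v) (pvDfsA_mem g fuel b v)
        · exact hmem' b hb
      · intro T hT hcurT hvT
        exact hmin' T hT hcurT (hDmin T hT (hT cur hcurT a haN) hvT)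

theorem pvDfsA_main (bombs : List (List Int)) (g : PySem.Dict Int (List Int))
    (hg : ∀ u ∈ pvR bombs, g.getD u [] = pvN bombs u) :
    ∀ fuel, pvDfsGood bombs g fuel := by
  intro fuel
  induction fuel with
  | zero =>
    intro cur visit hcur hnotin hnd hsub hbudget
    exfalso
    have h1 : (visit ++ [cur]).Nodup := by
      simp only [List.nodup_append, List.nodup_cons, List.not_mem_nil, not_false_iff,
        List.nodup_nil, and_true, true_and]
      refine ⟨hnd, ?_⟩
      intro a ha b hb hab
      simp only [List.mem_singleton] at hb
      subst hb; subst hab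
      exact hnotin ha
    have h2 : (visit ++ [cur]) ⊆ pvR bombs := by
      intro x hx
      rcases List.mem_append.mp hx with h | h
      · exact hsub h
      · simp only [List.mem_singleton] at h; exact h ▸ hcur
    have h3 := pvNodup_length_le h1 h2
    rw [pvR_length] at h3
    simp only [List.length_append, List.length_cons, List.length_nil] at h3
    omega
  | succ fuel ih =>
    intro cur visit hcur hnotin hnd hsub hbudget
    have hns : g.getD cur [] = pvN bombs cur := hg cur hcur
    have hv0 : PySem.Set.add visit cur = visit ++ [cur] := PySem.Set.add_of_not_mem hnotin
    have hinv0 : pvDfsInv bombs visit cur (PySem.Set.add visit cur) := by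
      rw [hv0]
      refine ⟨?_, ?_, ?_, ?_, ?_⟩
      · simp only [List.nodup_append, List.nodup_cons, List.not_mem_nil, not_false_iff,
          List.nodup_nil, and_true, true_and]
        refine ⟨hnd, ?_⟩
        intro a ha b hb hab
        simp only [List.mem_singleton] at hb
        subst hb; subst hab
        exact hnotin ha
      · intro x hx
        rcases List.mem_append.mp hx with h | h
        · exact hsub h
        · simp only [List.mem_singleton] at h; exact h ▸ hcur
      · simp
      · simp
      · intro x hx hxvis hxcur y hy
        rcases List.mem_append.mp hx with h | h
        · exact absurd h hxvis
        · simp only [List.mem_singleton] at h; exact absurd h hxcur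
    obtain ⟨⟨hnd', hsub', _, _, hclosed'⟩, hmem', hmin'⟩ :=
      pvDfsA_fold bombs g fuel ih cur visit (by omega) (g.getD cur [])
        (PySem.Set.add visit cur) (by rw [hns]; exact fun a ha => ha) hinv0
    have heq : pvDfsA g (fuel+1) cur visit
        = (g.getD cur []).foldl (fun v nb => if nb ∈ v then v else pvDfsA g fuel nb v)
            (PySem.Set.add visit cur) := rfl
    rw [heq]
    refine ⟨hnd', hsub', ?_, ?_⟩
    · intro x hx hxvis y hy
      by_cases hxc : x = cur
      · subst hxc
        exact hmem' y (by rw [hns]; exact hy)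
      · exact hclosed' x hx hxvis hxc y hy
    · intro T hT hcurT hvisT
      refine hmin' T hT hcurT ?_
      rw [hv0]
      intro x hx
      rcases List.mem_append.mp hx with h | h
      · exact hvisT h
      · simp only [List.mem_singleton] at h; exact h ▸ hcurT

theorem pvBfsB_nilF (adj : List (List Int)) :
    ∀ (fuel : Nat) (r : List Int), pvBfsB adj fuel r [] = r := by
  intro fuel r; cases fuel <;> rfl

-- invariant carried by B's (reach, new-frontier) pair during one pass
def pvBfsInv (bombs : List (List Int)) (reach : List Int) (rq : List Int × List Int) : Prop :=
  rq.1.Nodup ∧ rq.1 ⊆ pvR bombs ∧ reach ⊆ rq.1 ∧ rq.2 ⊆ rq.1 ∧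
  (∀ x ∈ rq.1, x ∈ reach ∨ x ∈ rq.2) ∧ (∀ x ∈ rq.2, x ∉ reach)

theorem pvBfsInner_mono :
    ∀ (vs : List Int) (rq : List Int × List Int),
      rq.1 ⊆ (vs.foldl (fun rq v => if v ∈ rq.1 then rq
        else (PySem.Set.add rq.1 v, rq.2 ++ [v])) rq).1 := by
  intro vs
  induction vs with
  | nil => intro rq; exact fun x h => h
  | cons v vs ihv =>
    intro rq
    simp only [List.foldl_cons]
    by_cases hv : v ∈ rq.1
    · rw [if_pos hv]; exact ihv rq
    · rw [if_neg hv]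
      intro x hx
      exact ihv _ ((PySem.Set.mem_add rq.1 v x).mpr (Or.inl hx))

theorem pvBfsOuter_mono (adj : List (List Int)) :
    ∀ (us : List Int) (rq : List Int × List Int),
      rq.1 ⊆ (us.foldl (fun rq u => (PySem.List.pyGetD adj u []).foldl
        (fun rq v => if v ∈ rq.1 then rq
          else (PySem.Set.add rq.1 v, rq.2 ++ [v])) rq) rq).1 := by
  intro us
  induction us with
  | nil => intro rq; exact fun x h => h
  | cons u us ihu =>
    intro rq
    simp only [List.foldl_cons]
    exact fun x hx => ihu _ (pvBfsInner_mono _ _ hx)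

theorem pvBfsInner (bombs : List (List Int)) (reach : List Int) (u : Int) :
    ∀ (vs : List Int) (rq : List Int × List Int), (∀ v ∈ vs, v ∈ pvN bombs u) →
      pvBfsInv bombs reach rq →
      pvBfsInv bombs reach (vs.foldl (fun rq v => if v ∈ rq.1 then rq
        else (PySem.Set.add rq.1 v, rq.2 ++ [v])) rq) ∧
      (∀ v ∈ vs, v ∈ (vs.foldl (fun rq v => if v ∈ rq.1 then rq
        else (PySem.Set.add rq.1 v, rq.2 ++ [v])) rq).1) ∧
      (∀ T, pvClosed bombs T → u ∈ T → rq.1 ⊆ T →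
        (vs.foldl (fun rq v => if v ∈ rq.1 then rq
          else (PySem.Set.add rq.1 v, rq.2 ++ [v])) rq).1 ⊆ T) := by
  intro vs
  induction vs with
  | nil =>
    intro rq _ hinv
    exact ⟨hinv, fun v hv => absurd hv List.not_mem_nil, fun T _ _ h => h⟩
  | cons v vs ihv =>
    intro rq hvs hinv
    obtain ⟨hnd, hsub, hre, hqr, hcov, hfresh⟩ := hinv
    simp only [List.foldl_cons]
    by_cases hv : v ∈ rq.1
    · rw [if_pos hv]
      obtain ⟨hinv', hmem', hmin'⟩ :=
        ihv rq (fun b hb => hvs b (List.mem_cons_of_mem _ hb)) ⟨hnd, hsub, hre, hqr, hcov, hfresh⟩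
      refine ⟨hinv', ?_, hmin'⟩
      intro b hb
      rcases List.mem_cons.mp hb with rfl | hb
      · exact pvBfsInner_mono vs rq hv
      · exact hmem' b hb
    · rw [if_neg hv]
      have hvN : v ∈ pvN bombs u := hvs v (List.mem_cons_self ..)
      have hadd : PySem.Set.add rq.1 v = rq.1 ++ [v] := PySem.Set.add_of_not_mem hv
      have hinv2 : pvBfsInv bombs reach (PySem.Set.add rq.1 v, rq.2 ++ [v]) := by
        refine ⟨?_, ?_, ?_, ?_, ?_, ?_⟩
        · show (PySem.Set.add rq.1 v).Nodup
          rw [hadd]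
          simp only [List.nodup_append, List.nodup_cons, List.not_mem_nil, not_false_iff,
            List.nodup_nil, and_true, true_and]
          refine ⟨hnd, ?_⟩
          intro a ha b hb hab
          simp only [List.mem_singleton] at hb
          subst hb; subst hab
          exact hv ha
        · show PySem.Set.add rq.1 v ⊆ pvR bombs
          rw [hadd]
          intro x hx
          rcases List.mem_append.mp hx with h | h
          · exact hsub h
          · simp only [List.mem_singleton] at h; exact h ▸ pvN_subset hvN
        · show reach ⊆ PySem.Set.add rq.1 v
          rw [hadd]; exact fun x hx => List.mem_append.mpr (Or.inl (hre hx))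
        · show rq.2 ++ [v] ⊆ PySem.Set.add rq.1 v
          rw [hadd]
          intro x hx
          rcases List.mem_append.mp hx with h | h
          · exact List.mem_append.mpr (Or.inl (hqr h))
          · exact List.mem_append.mpr (Or.inr h)
        · show ∀ x ∈ PySem.Set.add rq.1 v, x ∈ reach ∨ x ∈ rq.2 ++ [v]
          rw [hadd]
          intro x hx
          rcases List.mem_append.mp hx with h | h
          · rcases hcov x h with h2 | h2
            · exact Or.inl h2
            · exact Or.inr (List.mem_append.mpr (Or.inl h2))
          · exact Or.inr (List.mem_append.mpr (Or.inr h))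
        · show ∀ x ∈ rq.2 ++ [v], x ∉ reach
          intro x hx
          rcases List.mem_append.mp hx with h | h
          · exact hfresh x h
          · simp only [List.mem_singleton] at h
            exact h ▸ fun hc => hv (hre hc)
      obtain ⟨hinv', hmem', hmin'⟩ :=
        ihv _ (fun b hb => hvs b (List.mem_cons_of_mem _ hb)) hinv2
      refine ⟨hinv', ?_, ?_⟩
      · intro b hb
        rcases List.mem_cons.mp hb with rfl | hb
        · refine pvBfsInner_mono vs _ ?_
          show b ∈ PySem.Set.add rq.1 b
          exact (PySem.Set.mem_add rq.1 b b).mpr (Or.inr rfl)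
        · exact hmem' b hb
      · intro T hT huT hrT
        refine hmin' T hT huT ?_
        show PySem.Set.add rq.1 v ⊆ T
        rw [hadd]
        intro x hx
        rcases List.mem_append.mp hx with h | h
        · exact hrT h
        · simp only [List.mem_singleton] at h
          exact h ▸ hT u huT v hvN

theorem pvBfsOuter (bombs adj : List (List Int))
    (ha : ∀ u ∈ pvR bombs, PySem.List.pyGetD adj u [] = pvN bombs u) (reach : List Int) :
    ∀ (us : List Int) (rq : List Int × List Int), (∀ u ∈ us, u ∈ reach) →
      pvBfsInv bombs reach rq →
      pvBfsInv bombs reach (us.foldl (fun rq u => (PySem.List.pyGetD adj u []).foldl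
        (fun rq v => if v ∈ rq.1 then rq
          else (PySem.Set.add rq.1 v, rq.2 ++ [v])) rq) rq) ∧
      (∀ u ∈ us, ∀ y ∈ pvN bombs u,
        y ∈ (us.foldl (fun rq u => (PySem.List.pyGetD adj u []).foldl
          (fun rq v => if v ∈ rq.1 then rq
            else (PySem.Set.add rq.1 v, rq.2 ++ [v])) rq) rq).1) ∧
      (∀ T, pvClosed bombs T → rq.1 ⊆ T →
        (us.foldl (fun rq u => (PySem.List.pyGetD adj u []).foldl
          (fun rq v => if v ∈ rq.1 then rq
            else (PySem.Set.add rq.1 v, rq.2 ++ [v])) rq) rq).1 ⊆ T) := by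
  intro us
  induction us with
  | nil =>
    intro rq _ hinv
    exact ⟨hinv, fun u hu => absurd hu List.not_mem_nil, fun T _ h => h⟩
  | cons u us ihu =>
    intro rq hus hinv
    obtain ⟨hnd, hsub, hre, hqr, hcov, hfresh⟩ := hinv
    have huRe : u ∈ reach := hus u (List.mem_cons_self ..)
    have huR : u ∈ pvR bombs := hsub (hre huRe)
    simp only [List.foldl_cons]
    have hvs : ∀ v ∈ PySem.List.pyGetD adj u [], v ∈ pvN bombs u := by
      rw [ha u huR]; exact fun v hv => hv
    obtain ⟨hinv', hmem', hmin'⟩ :=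
      pvBfsInner bombs reach u (PySem.List.pyGetD adj u []) rq hvs
        ⟨hnd, hsub, hre, hqr, hcov, hfresh⟩
    obtain ⟨hinv'', hmem'', hmin''⟩ :=
      ihu _ (fun b hb => hus b (List.mem_cons_of_mem _ hb)) hinv'
    refine ⟨hinv'', ?_, ?_⟩
    · intro w hw y hy
      rcases List.mem_cons.mp hw with rfl | hw
      · exact pvBfsOuter_mono adj us _ (hmem' y (by rw [ha w huR]; exact hy))
      · exact hmem'' w hw y hy
    · intro T hT hrT
      exact hmin'' T hT (hmin' T hT (hrT (hre huRe)) hrT)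

theorem pvBfsB_main (bombs adj : List (List Int))
    (ha : ∀ u ∈ pvR bombs, PySem.List.pyGetD adj u [] = pvN bombs u) :
    ∀ (fuel : Nat) (reach frontier : List Int), reach.Nodup → reach ⊆ pvR bombs →
      (∀ u ∈ frontier, u ∈ reach) →
      (∀ x ∈ reach, x ∉ frontier → ∀ y ∈ pvN bombs x, y ∈ reach) →
      bombs.length + 1 ≤ fuel + reach.length →
      reach ⊆ pvBfsB adj fuel reach frontier ∧ (pvBfsB adj fuel reach frontier).Nodup ∧
      pvBfsB adj fuel reach frontier ⊆ pvR bombs ∧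
      pvClosed bombs (pvBfsB adj fuel reach frontier) ∧
      (∀ T, pvClosed bombs T → reach ⊆ T → pvBfsB adj fuel reach frontier ⊆ T) := by
  intro fuel
  induction fuel with
  | zero =>
    intro reach frontier hnd hsub _ _ hbudget
    exfalso
    have := pvNodup_length_le hnd hsub
    rw [pvR_length] at this
    omega
  | succ fuel ih =>
    intro reach frontier hnd hsub hfr hpend hbudget
    cases frontier with
    | nil =>
      have heq : pvBfsB adj (fuel+1) reach [] = reach := rfl
      rw [heq]
      exact ⟨fun x h => h, hnd, hsub,
        fun x hx y hy => hpend x hx List.not_mem_nil y hy, fun T _ h => h⟩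
    | cons u us =>
      have hinv0 : pvBfsInv bombs reach (reach, ([] : List Int)) :=
        ⟨hnd, hsub, fun x h => h, fun x hx => absurd hx List.not_mem_nil,
          fun x hx => Or.inl hx, fun x hx => absurd hx List.not_mem_nil⟩
      obtain ⟨hinv', hproc, hmin'⟩ :=
        pvBfsOuter bombs adj ha reach (u :: us) (reach, ([] : List Int)) hfr hinv0
      set rq := (u :: us).foldl (fun rq u => (PySem.List.pyGetD adj u []).foldl
        (fun rq v => if v ∈ rq.1 then rq
          else (PySem.Set.add rq.1 v, rq.2 ++ [v])) rq) (reach, ([] : List Int))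
      obtain ⟨hnd', hsub', hre', hqr', hcov', hfresh'⟩ := hinv'
      have hpend' : ∀ x ∈ rq.1, x ∉ rq.2 → ∀ y ∈ pvN bombs x, y ∈ rq.1 := by
        intro x hx hxq y hy
        rcases hcov' x hx with hxr | hxq2
        · by_cases hxf : x ∈ u :: us
          · exact hproc x hxf y hy
          · exact hre' (hpend x hxr hxf y hy)
        · exact absurd hxq2 hxq
      have heq : pvBfsB adj (fuel+1) reach (u :: us) = pvBfsB adj fuel rq.1 rq.2 := rfl
      rw [heq]
      cases hq : rq.2 with
      | nil =>
        rw [pvBfsB_nilF]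
        refine ⟨hre', hnd', hsub', ?_, fun T hT hrT => hmin' T hT hrT⟩
        intro x hx y hy
        exact hpend' x hx (by rw [hq]; exact List.not_mem_nil) y hy
      | cons a q =>
        rw [← hq]
        have haq : a ∈ rq.2 := by rw [hq]; exact List.mem_cons_self ..
        have har : a ∈ rq.1 := hqr' haq
        have hanr : a ∉ reach := hfresh' a haq
        have hnda : (reach ++ [a]).Nodup := by
          simp only [List.nodup_append, List.nodup_cons, List.not_mem_nil, not_false_iff,
            List.nodup_nil, and_true, true_and]
          refine ⟨hnd, ?_⟩
          intro x hx b hb hab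
          simp only [List.mem_singleton] at hb
          subst hb; subst hab
          exact hanr hx
        have hsra : (reach ++ [a]) ⊆ rq.1 := by
          intro x hx
          rcases List.mem_append.mp hx with h | h
          · exact hre' h
          · simp only [List.mem_singleton] at h; exact h ▸ har
        have hlen : reach.length + 1 ≤ rq.1.length := by
          have := pvNodup_length_le hnda hsra
          simp only [List.length_append, List.length_cons, List.length_nil] at this
          omega
        obtain ⟨h1, h2, h3, h4, h5⟩ :=
          ih rq.1 rq.2 hnd' hsub' (fun x hx => hqr' hx) hpend' (by omega)
        refine ⟨fun x hx => h1 (hre' hx), h2, h3, h4, ?_⟩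
        intro T hT hrT
        exact h5 T hT (hmin' T hT hrT)

-- the two traversals from source i reach the same node set, hence the same count
theorem pvPerI (bombs : List (List Int)) (i : Int) (hi : i ∈ pvR bombs) :
    (pvDfsA (pvGraphA bombs) bombs.length i PySem.Set.empty).length
      = (pvBfsB (pvAdjB bombs) (bombs.length + 1) (PySem.Set.ofList [i]) [i]).length := by
  obtain ⟨hAnd, hAsub, hAclosed, hAmin⟩ :=
    pvDfsA_main bombs (pvGraphA bombs) (fun u hu => pvGraphA_getD bombs u hu) bombs.length
      i [] hi List.not_mem_nil List.nodup_nil (fun x hx => absurd hx List.not_mem_nil)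
      (by simp)
  have hiA : i ∈ pvDfsA (pvGraphA bombs) bombs.length i [] := pvDfsA_mem _ _ _ _
  have hAcl : pvClosed bombs (pvDfsA (pvGraphA bombs) bombs.length i []) :=
    fun x hx y hy => hAclosed x hx List.not_mem_nil y hy
  obtain ⟨hBre, hBnd, hBsub, hBcl, hBmin⟩ :=
    pvBfsB_main bombs (pvAdjB bombs) (fun u hu => pvAdjB_getD bombs u hu) (bombs.length + 1)
      [i] [i] (List.nodup_singleton i)
      (by intro x hx; simp only [List.mem_singleton] at hx; exact hx ▸ hi)
      (fun u hu => hu)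
      (fun x hx hxn => absurd hx hxn)
      (by simp)
  have hiB : i ∈ pvBfsB (pvAdjB bombs) (bombs.length + 1) [i] [i] :=
    hBre (List.mem_cons_self ..)
  have hAB : pvDfsA (pvGraphA bombs) bombs.length i []
      ⊆ pvBfsB (pvAdjB bombs) (bombs.length + 1) [i] [i] :=
    hAmin _ hBcl hiB (fun x hx => absurd hx List.not_mem_nil)
  have hBA : pvBfsB (pvAdjB bombs) (bombs.length + 1) [i] [i]
      ⊆ pvDfsA (pvGraphA bombs) bombs.length i [] :=
    hBmin _ hAcl (by intro x hx; simp only [List.mem_singleton] at hx; exact hx ▸ hiA)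
  exact ((List.perm_ext_iff_of_nodup hAnd hBnd).mpr
    (fun a => ⟨fun h => hAB h, fun h => hBA h⟩)).length_eq

-- ===== VERDICT (by name: the statement is the Claim_ definition above) =====
theorem maximumDetonationDFS_spec : Claim_equal_maximumDetonationDFS := by
  intro bombs _ _
  unfold Spec_maximumDetonationDFS
  rw [pvA_unfold, pvB_unfold]
  apply PySem.List.foldl_congr_mem
  intro acc i hi
  have h := pvPerI bombs i hi
  congr 1
  exact congrArg (fun m : Nat => (m : Int)) h
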